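-- pv_equiv track=rewrite | github.com/Sellaya/richview | scripts/migrate_to_folder_routes.py | rootize_assets
-- ===== SOURCE A (Python) =====
-- def rootize_assets(html: str) -> str:
--     pairs = [
--         ('href="css/', 'href="/css/'),
--         ("href='css/", "href='/css/"),
--         ('src="css/', 'src="/css/'),
--         ('href="js/', 'href="/js/'),
--         ('src="js/', 'src="/js/'),
--         ('href="images/', 'href="/images/'),
--         ('src="images/', 'src="/images/'),
--         ('srcset="images/', 'srcset="/images/'),
--         ("url('images/", "url('/images/"),
--         ('url("images/', 'url("/images/'),
--         ('url(images/', 'url(/images/'),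
--     ]
--     for old, new in pairs:
--         html = html.replace(old, new)
--     return html
-- ===== SOURCE B (Python) =====
-- def _slashed(old: str) -> str:
--     # insert the root slash right after the attribute opener (last quote or paren)
--     i = max(old.rfind(ch) for ch in '"\'(')
--     return old[:i + 1] + '/' + old[i + 1:]
--
--
-- _PREFIXES = [
--     'href="css/',
--     "href='css/",
--     'src="css/',
--     'href="js/',
--     'src="js/',
--     'href="images/',
--     'src="images/',
--     'srcset="images/',
--     "url('images/",
--     'url("images/',
--     'url(images/',
-- ]
--
-- _PAIRS = [(old, _slashed(old)) for old in _PREFIXES]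
--
--
-- def rootize_assets(html: str) -> str:
--     # one left-to-right pass: at each position emit the slashed form of the
--     # first matching literal (and skip it), or copy the character
--     out = []
--     i = 0
--     n = len(html)
--     while i < n:
--         for old, new in _PAIRS:
--             if html.startswith(old, i):
--                 out.append(new)
--                 i += len(old)
--                 break
--         else:
--             out.append(html[i])
--             i += 1
--     return "".join(out)
-- ===== Notes on version B (the rewrite author's own statement) =====
-- stated objective: alternative
-- what changed: Replaces A's eleven sequential full-string replace passes by a single left-to-right scan that, at each position, emits the slashed form of the first matching literal (or copies the character), building the output once.
import Mathlib
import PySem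

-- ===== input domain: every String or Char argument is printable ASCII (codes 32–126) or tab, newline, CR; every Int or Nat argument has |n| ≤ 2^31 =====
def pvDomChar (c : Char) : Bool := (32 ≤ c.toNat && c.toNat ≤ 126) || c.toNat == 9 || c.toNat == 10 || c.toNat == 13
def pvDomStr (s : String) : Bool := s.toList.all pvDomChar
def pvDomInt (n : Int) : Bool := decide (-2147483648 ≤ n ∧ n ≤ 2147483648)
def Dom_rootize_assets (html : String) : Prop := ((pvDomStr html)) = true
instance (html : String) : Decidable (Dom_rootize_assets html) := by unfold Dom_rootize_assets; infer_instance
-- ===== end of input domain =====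

-- B replaces A's eleven sequential full-string replace passes by one left-to-right scan
-- emitting the slashed form of the first literal matching at each position (objective: alternative).

-- ===== PORT A =====
def pairsA : List (String × String) := [
  ("href=\"css/", "href=\"/css/"),
  ("href='css/", "href='/css/"),
  ("src=\"css/", "src=\"/css/"),
  ("href=\"js/", "href=\"/js/"),
  ("src=\"js/", "src=\"/js/"),
  ("href=\"images/", "href=\"/images/"),
  ("src=\"images/", "src=\"/images/"),
  ("srcset=\"images/", "srcset=\"/images/"),
  ("url('images/", "url('/images/"),
  ("url(\"images/", "url(\"/images/"),
  ("url(images/", "url(/images/")]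

def rootize_assets (html : String) : String :=
  pairsA.foldl (fun h q => PySem.Str.replace h q.1 q.2) html

-- ===== PORT B =====
-- Source B's _slashed: insert the root slash right after the attribute opener (last quote or paren)
def slashed (o : List Char) : List Char :=
  let i : Int := max (max (PySem.Chars.rfind o ['"']) (PySem.Chars.rfind o ['\''])) (PySem.Chars.rfind o ['('])
  o.take (i.toNat + 1) ++ '/' :: o.drop (i.toNat + 1)

def prefixesB : List (List Char) := [
  "href=\"css/".toList,
  "href='css/".toList,
  "src=\"css/".toList,
  "href=\"js/".toList,
  "src=\"js/".toList,
  "href=\"images/".toList,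
  "src=\"images/".toList,
  "srcset=\"images/".toList,
  "url('images/".toList,
  "url(\"images/".toList,
  "url(images/".toList]

def pairsB : List (List Char × List Char) := prefixesB.map (fun o => (o, slashed o))

-- Source B's while loop over the position i, as recursion on the remaining suffix
-- (the fuel only makes the recursion structural; it never runs out since fuel ≥ length)
def rootizeGo : Nat → List Char → List Char
  | 0, l => l
  | _ + 1, [] => []
  | fuel + 1, c :: t =>
    match pairsB.find? (fun q => q.1.isPrefixOf (c :: t)) with
    | some q => q.2 ++ rootizeGo fuel ((c :: t).drop q.1.length)
    | none => c :: rootizeGo fuel t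

def rootize_assets_alt (html : String) : String :=
  String.ofList (rootizeGo html.toList.length html.toList)

-- ===== PRECONDITION & SPEC =====
def Spec_rootize_assets (html : String) (out : String) : Prop := out = rootize_assets_alt html
instance (html : String) (out : String) : Decidable (Spec_rootize_assets html out) := by unfold Spec_rootize_assets; infer_instance

-- ===== CLAIM (what is proved, stated in full; the proofs are below) =====
def Claim_equal_rootize_assets : Prop := ∀ (html : String), Dom_rootize_assets html → Spec_rootize_assets html (rootize_assets html)

-- ===== LEMMAS AND PROOFS =====

-- A's replace pass (for a nonempty pattern), without the accumulator of PySem.Chars.replace.go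
def Repl (po pn : List Char) : Nat → List Char → List Char
  | 0, l => l
  | _ + 1, [] => []
  | fuel + 1, c :: t =>
    if po.isPrefixOf (c :: t) then pn ++ Repl po pn fuel ((c :: t).drop po.length)
    else c :: Repl po pn fuel t

-- the simultaneous scan, generalized over the pair list
def scanGo (P : List (List Char × List Char)) : Nat → List Char → List Char
  | 0, l => l
  | _ + 1, [] => []
  | fuel + 1, c :: t =>
    (P.find? (fun q => q.1.isPrefixOf (c :: t))).elim
      (c :: scanGo P fuel t)
      (fun q => q.2 ++ scanGo P fuel ((c :: t).drop q.1.length))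

lemma rootizeGo_eq_scanGo : ∀ (f : Nat) (s : List Char), rootizeGo f s = scanGo pairsB f s := by
  intro f
  induction f with
  | zero => intro s; rfl
  | succ f ih =>
    intro s
    cases s with
    | nil => rfl
    | cons c t =>
      simp only [rootizeGo, scanGo]
      cases pairsB.find? (fun q => q.1.isPrefixOf (c :: t)) with
      | none => simp [ih]
      | some q => simp [ih]

-- non-interference conditions between an earlier pair q and a later pair p (decidable, checked on the literals)
abbrev Good2 (q p : List Char × List Char) : Prop :=
  (∀ j, j < q.2.length → ¬ (p.1 <+: q.2.drop j) ∧ ¬ (q.2.drop j <+: p.1)) ∧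
  (∀ j, 1 ≤ j → j < p.1.length → ¬ (q.1 <+: p.1.drop j) ∧ ¬ (p.1.drop j <+: q.1)) ∧
  (∀ j, j < p.1.length → ¬ (p.1.drop j <+: q.2) ∧ ¬ (q.2 <+: p.1.drop j))

lemma prefix_left_of_le {l u v : List Char} (h : l <+: u ++ v) (hle : l.length ≤ u.length) :
    l <+: u :=
  List.prefix_of_prefix_length_le h (List.prefix_append u v) hle

lemma prefix_rev_of_le {l u v : List Char} (h : l <+: u ++ v) (hle : u.length ≤ l.length) :
    u <+: l :=
  List.prefix_of_prefix_length_le (List.prefix_append u v) h hle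

lemma exists_cons_of_ne_nil {l : List Char} (h : l ≠ []) : ∃ c t, l = c :: t := by
  cases l with
  | nil => exact absurd rfl h
  | cons c t => exact ⟨c, t, rfl⟩

lemma Repl_nil (po pn : List Char) (f : Nat) : Repl po pn f [] = [] := by cases f <;> rfl

lemma scanGo_nil (P : List (List Char × List Char)) (f : Nat) : scanGo P f [] = [] := by
  cases f <;> rfl

lemma go_eq_Repl (po pn : List Char) :
    ∀ (f : Nat) (s acc : List Char),
      PySem.Chars.replace.go po pn f s acc = acc.reverse ++ Repl po pn f s := by
  intro f
  induction f with
  | zero =>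
    intro s acc
    rw [PySem.Chars.replace.go.eq_def]
    rfl
  | succ f ih =>
    intro s acc
    cases s with
    | nil =>
      rw [PySem.Chars.replace.go.eq_def]
      simp [Repl_nil]
    | cons c t =>
      rw [PySem.Chars.replace.go.eq_def]
      simp only [Repl]
      by_cases hp : po.isPrefixOf (c :: t)
      · simp [hp, ih]
      · simp [hp, ih]

lemma replace_eq_Repl (po pn s : List Char) (h : po ≠ []) :
    PySem.Chars.replace s po pn = Repl po pn s.length s := by
  rw [PySem.Chars.replace]
  rw [if_neg (by simpa [List.isEmpty_iff] using h)]
  rw [go_eq_Repl]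
  rfl

lemma Repl_fuel (po pn : List Char) (hpo : 1 ≤ po.length) :
    ∀ (f₁ : Nat) (s : List Char) (f₂ : Nat), s.length ≤ f₁ → s.length ≤ f₂ →
      Repl po pn f₁ s = Repl po pn f₂ s := by
  intro f₁
  induction f₁ with
  | zero =>
    intro s f₂ h1 _
    have : s = [] := List.eq_nil_of_length_eq_zero (by omega)
    subst this; simp [Repl_nil]
  | succ f ih =>
    intro s f₂ h1 h2
    cases s with
    | nil => simp [Repl_nil]
    | cons c t =>
      have ht1 : t.length + 1 ≤ f + 1 := by simpa using h1
      cases f₂ with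
      | zero => simp at h2
      | succ f₂ =>
        have ht2 : t.length + 1 ≤ f₂ + 1 := by simpa using h2
        simp only [Repl]
        by_cases hp : po.isPrefixOf (c :: t)
        · rw [if_pos hp, if_pos hp]
          congr 1
          exact ih _ _ (by simp [List.length_drop]; omega) (by simp [List.length_drop]; omega)
        · rw [if_neg hp, if_neg hp]
          congr 1
          exact ih _ _ (by omega) (by omega)

lemma scanGo_fuel (P : List (List Char × List Char)) (hP : ∀ q ∈ P, q.1 ≠ []) :
    ∀ (f₁ : Nat) (s : List Char) (f₂ : Nat), s.length ≤ f₁ → s.length ≤ f₂ →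
      scanGo P f₁ s = scanGo P f₂ s := by
  intro f₁
  induction f₁ with
  | zero =>
    intro s f₂ h1 _
    have : s = [] := List.eq_nil_of_length_eq_zero (by omega)
    subst this; simp [scanGo_nil]
  | succ f ih =>
    intro s f₂ h1 h2
    cases s with
    | nil => simp [scanGo_nil]
    | cons c t =>
      have ht1 : t.length + 1 ≤ f + 1 := by simpa using h1
      cases f₂ with
      | zero => simp at h2
      | succ f₂ =>
        have ht2 : t.length + 1 ≤ f₂ + 1 := by simpa using h2
        simp only [scanGo]
        cases hfind : P.find? (fun q => q.1.isPrefixOf (c :: t)) with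
        | none =>
          simp only [Option.elim_none]
          congr 1
          exact ih t f₂ (by omega) (by omega)
        | some q =>
          have hq1 : q.1 ≠ [] := hP q (List.mem_of_find?_eq_some hfind)
          have hlen : 1 ≤ q.1.length := by
            obtain ⟨a, b, hq⟩ := exists_cons_of_ne_nil hq1
            simp [hq]
          simp only [Option.elim_some]
          congr 1
          exact ih _ _ (by simp [List.length_drop]; omega) (by simp [List.length_drop]; omega)

lemma scanGo_empty :
    ∀ (f : Nat) (s : List Char), s.length ≤ f → scanGo [] f s = s := by
  intro f
  induction f with
  | zero =>
    intro s h1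
    have : s = [] := List.eq_nil_of_length_eq_zero (by omega)
    subst this; rfl
  | succ f ih =>
    intro s h1
    cases s with
    | nil => rfl
    | cons c t =>
      simp only [scanGo, List.find?_nil, Option.elim_none]
      rw [ih t (by simp at h1; omega)]

-- Repl leaves a replacement-output block n untouched and steps over it
lemma Repl_split (po pn : List Char) :
    ∀ (n : List Char), (∀ j, j < n.length → ¬ (po <+: n.drop j) ∧ ¬ (n.drop j <+: po)) →
      ∀ X : List Char, Repl po pn (n ++ X).length (n ++ X) = n ++ Repl po pn X.length X := by
  intro n
  induction n with
  | nil => intro _ X; simp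
  | cons c n' ih =>
    intro hg X
    have hnm : ¬ (po.isPrefixOf (c :: (n' ++ X)) = true) := by
      rw [List.isPrefixOf_iff_prefix]
      intro hcon
      have hcon' : po <+: (c :: n') ++ X := by simpa using hcon
      by_cases hle : po.length ≤ (c :: n').length
      · exact (hg 0 (by simp)).1 (by simpa using prefix_left_of_le hcon' hle)
      · exact (hg 0 (by simp)).2 (by simpa using prefix_rev_of_le hcon' (by omega))
    rw [List.cons_append]
    simp only [List.length_cons, Repl]
    rw [if_neg hnm]
    rw [ih (fun j hj => by simpa using hg (j + 1) (by simp; omega)) X, List.cons_append]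

-- the scan copies a region verbatim when no pattern starts inside it
lemma scanGo_verbatim (P : List (List Char × List Char)) :
    ∀ (u : List Char) (f : Nat) (v : List Char), (u ++ v).length ≤ f →
      (∀ j, j < u.length → ∀ q ∈ P, ¬ (q.1 <+: (u ++ v).drop j)) →
      scanGo P f (u ++ v) = u ++ scanGo P (f - u.length) v := by
  intro u
  induction u with
  | nil => intro f v _ _; simp
  | cons c u' ih =>
    intro f v hf hs
    cases f with
    | zero => simp at hf
    | succ f =>
      have hf' : (u' ++ v).length ≤ f := by simp at hf ⊢; omega
      have hnone : P.find? (fun q => q.1.isPrefixOf (c :: (u' ++ v))) = none := by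
        rw [List.find?_eq_none]
        intro q hq
        show ¬ q.1.isPrefixOf (c :: (u' ++ v)) = true
        rw [List.isPrefixOf_iff_prefix]
        exact fun hcon => hs 0 (by simp) q hq (by simpa using hcon)
      rw [List.cons_append]
      simp only [scanGo, hnone, Option.elim_none]
      rw [ih f v hf' (fun j hj q hq => by simpa using hs (j + 1) (by simp; omega) q hq)]
      simp

-- stepping over a full occurrence of the pattern
lemma Repl_head (po pn : List Char) (hpo : po ≠ []) :
    ∀ X : List Char, Repl po pn (po ++ X).length (po ++ X) = pn ++ Repl po pn X.length X := by
  intro X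
  obtain ⟨pc, po', rfl⟩ := exists_cons_of_ne_nil hpo
  have hpre : (pc :: po').isPrefixOf (pc :: (po' ++ X)) = true :=
    List.isPrefixOf_iff_prefix.mpr (by rw [← List.cons_append]; exact List.prefix_append (pc :: po') X)
  rw [List.cons_append]
  simp only [List.length_cons, Repl]
  rw [if_pos hpre]
  simp only [List.drop_succ_cons, List.drop_left]
  congr 1
  exact Repl_fuel (pc :: po') pn (by simp) _ X _ (by simp) le_rfl

-- no new match of the later pattern appears at the head of the scan's output
lemma scanGo_headsafe (P : List (List Char × List Char)) (po : List Char)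
    (hg : ∀ q ∈ P, ∀ j, j < po.length → ¬ (po.drop j <+: q.2) ∧ ¬ (q.2 <+: po.drop j)) :
    ∀ (f : Nat) (s : List Char), s.length ≤ f → ∀ j, j < po.length →
      ¬ (po.drop j <+: s) → ¬ (po.drop j <+: scanGo P f s) := by
  intro f
  induction f with
  | zero =>
    intro s h1 j hj hns
    have : s = [] := List.eq_nil_of_length_eq_zero (by omega)
    subst this; simpa [scanGo_nil] using hns
  | succ f ih =>
    intro s h1 j hj hns
    cases s with
    | nil => simpa [scanGo_nil] using hns
    | cons c t =>
      have ht1 : t.length ≤ f := by simp at h1; omega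
      simp only [scanGo]
      cases hfind : P.find? (fun q => q.1.isPrefixOf (c :: t)) with
      | some q =>
        simp only [Option.elim_some]
        intro hcon
        have hqm := List.mem_of_find?_eq_some hfind
        by_cases hle : (po.drop j).length ≤ q.2.length
        · exact (hg q hqm j hj).1 (prefix_left_of_le hcon hle)
        · exact (hg q hqm j hj).2 (prefix_rev_of_le hcon (by omega))
      | none =>
        simp only [Option.elim_none]
        intro hcon
        have hdj : po.drop j = po[j] :: po.drop (j + 1) := List.drop_eq_getElem_cons hj
        rw [hdj, List.cons_prefix_cons] at hcon
        rcases Nat.lt_or_ge (j + 1) po.length with hlt | hge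
        · have hnt : ¬ (po.drop (j + 1) <+: t) := by
            intro hcn
            exact hns (by rw [hdj, List.cons_prefix_cons]; exact ⟨hcon.1, hcn⟩)
          exact ih t ht1 (j + 1) hlt hnt hcon.2
        · have hnil : po.drop (j + 1) = [] := List.drop_eq_nil_of_le hge
          exact hns (by rw [hdj, hnil, List.cons_prefix_cons]; exact ⟨hcon.1, List.nil_prefix⟩)

-- the key lemma: one more replace pass on top of the scan of P = the scan of P extended by the pair
lemma key (P : List (List Char × List Char)) (po pn : List Char)
    (hpo : po ≠ [])
    (hP : ∀ q ∈ P, q.1 ≠ [])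
    (hg : ∀ q ∈ P, Good2 q (po, pn)) :
    ∀ (f : Nat) (s : List Char), s.length ≤ f →
      Repl po pn (scanGo P f s).length (scanGo P f s) = scanGo (P ++ [(po, pn)]) f s := by
  have hpol : 1 ≤ po.length := by
    obtain ⟨a, b, hq⟩ := exists_cons_of_ne_nil hpo
    simp [hq]
  intro f
  induction f with
  | zero =>
    intro s h1
    have : s = [] := List.eq_nil_of_length_eq_zero (by omega)
    subst this; simp [scanGo_nil, Repl_nil]
  | succ f ih =>
    intro s h1
    cases s with
    | nil => simp [scanGo_nil, Repl_nil]
    | cons c t =>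
      have ht1 : t.length ≤ f := by simp at h1; omega
      cases hfind : P.find? (fun q => q.1.isPrefixOf (c :: t)) with
      | some q =>
        have hqm := List.mem_of_find?_eq_some hfind
        have hq1 : q.1 ≠ [] := hP q hqm
        have hq1l : 1 ≤ q.1.length := by
          obtain ⟨a, b, hqq⟩ := exists_cons_of_ne_nil hq1
          simp [hqq]
        have hfind2 : (P ++ [(po, pn)]).find? (fun qq => qq.1.isPrefixOf (c :: t)) = some q := by
          rw [List.find?_append, hfind]; rfl
        simp only [scanGo, hfind, hfind2, Option.elim_some]
        rw [Repl_split po pn q.2 (fun j hj => (hg q hqm).1 j hj)]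
        rw [ih _ (by simp [List.length_drop]; omega)]
      | none =>
        have hnone : ∀ qq ∈ P, ¬ (qq.1 <+: c :: t) := by
          intro qq hqq
          have h := List.find?_eq_none.mp hfind qq hqq
          rw [← List.isPrefixOf_iff_prefix]
          simpa using h
        by_cases hpre : po <+: c :: t
        · -- the later pattern matches here: both sides insert the slash
          obtain ⟨v, hv⟩ := hpre
          have hvlen : po.length + v.length = t.length + 1 := by
            have := congrArg List.length hv
            simpa using this
          have hlenv2 : v.length ≤ f := by omega
          have hpt : po.isPrefixOf (c :: t) = true :=
            List.isPrefixOf_iff_prefix.mpr ⟨v, hv⟩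
          have hfind2 : (P ++ [(po, pn)]).find? (fun qq => qq.1.isPrefixOf (c :: t)) =
              some (po, pn) := by
            rw [List.find?_append, hfind]
            simp [List.find?, hpt]
          have hverb : scanGo P (f + 1) (po ++ v) = po ++ scanGo P (f + 1 - po.length) v := by
            apply scanGo_verbatim P po (f + 1) v (by rw [hv]; simpa using h1)
            intro j hj q hq hcon
            rcases Nat.eq_zero_or_pos j with rfl | hj1
            · exact hnone q hq (by simpa [hv] using hcon)
            · rw [List.drop_append_of_le_length (by omega)] at hcon
              have G := (hg q hq).2.1 j hj1 hj
              dsimp only at G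
              by_cases hle : q.1.length ≤ (po.drop j).length
              · exact G.1 (prefix_left_of_le hcon hle)
              · exact G.2 (prefix_rev_of_le hcon (by omega))
          have hL : scanGo P (f + 1) (c :: t) = po ++ scanGo P f v := by
            rw [← hv, hverb, scanGo_fuel P hP _ v f (by omega) hlenv2]
          have hR : scanGo (P ++ [(po, pn)]) (f + 1) (c :: t) =
              pn ++ scanGo (P ++ [(po, pn)]) f v := by
            simp only [scanGo, hfind2, Option.elim_some]
            congr 2
            rw [← hv, List.drop_left]
          rw [hL, hR, Repl_head po pn hpo, ih v hlenv2]
        · -- no pattern matches here: both sides copy the character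
          have hpf : ¬ (po.isPrefixOf (c :: t) = true) := by
            rw [List.isPrefixOf_iff_prefix]; exact hpre
          have hpfb : po.isPrefixOf (c :: t) = false := by
            cases h : po.isPrefixOf (c :: t) with
            | false => rfl
            | true => exact absurd (List.isPrefixOf_iff_prefix.mp h) hpre
          have hfind2 : (P ++ [(po, pn)]).find? (fun qq => qq.1.isPrefixOf (c :: t)) = none := by
            rw [List.find?_append, hfind]
            simp [List.find?, hpfb]
          have hLs : scanGo P (f + 1) (c :: t) = c :: scanGo P f t := by
            simp only [scanGo, hfind, Option.elim_none]
          have hRs : scanGo (P ++ [(po, pn)]) (f + 1) (c :: t) =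
              c :: scanGo (P ++ [(po, pn)]) f t := by
            simp only [scanGo, hfind2, Option.elim_none]
          rw [hLs, hRs]
          have hsafe : ¬ (po <+: c :: scanGo P f t) := by
            intro hcon
            obtain ⟨pc, po', hq⟩ := exists_cons_of_ne_nil hpo
            subst hq
            rw [List.cons_prefix_cons] at hcon
            obtain ⟨hpc, hcon2⟩ := hcon
            cases po' with
            | nil => exact hpre (by rw [List.cons_prefix_cons]; exact ⟨hpc, List.nil_prefix⟩)
            | cons a b =>
              have hnt : ¬ ((pc :: a :: b : List Char).drop 1 <+: t) := by
                simp only [List.drop_succ_cons, List.drop_zero]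
                intro hcn
                exact hpre (by rw [List.cons_prefix_cons]; exact ⟨hpc, hcn⟩)
              exact scanGo_headsafe P (pc :: a :: b)
                (fun q hqm j hj => (hg q hqm).2.2 j hj)
                f t ht1 1 (by simp) hnt (by simpa using hcon2)
          have hsafeb : ¬ (po.isPrefixOf (c :: scanGo P f t) = true) := by
            rw [List.isPrefixOf_iff_prefix]; exact hsafe
          simp only [List.length_cons, Repl]
          rw [if_neg hsafeb]
          rw [ih t ht1]

-- folding the replace passes of a good pair list = scanning with it
lemma fold_eq :
    ∀ (L : List (List Char × List Char)), (∀ q ∈ L, q.1 ≠ []) → L.Pairwise Good2 →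
      ∀ (f : Nat) (s : List Char), s.length ≤ f →
        L.foldl (fun h q => Repl q.1 q.2 h.length h) s = scanGo L f s := by
  intro L
  induction L using List.reverseRecOn with
  | nil => intro _ _ f s hf; simpa using (scanGo_empty f s hf).symm
  | append_singleton l p ihl =>
    intro hne hpw f s hf
    obtain ⟨po, pn⟩ := p
    rw [List.pairwise_append] at hpw
    rw [List.foldl_append]
    simp only [List.foldl_cons, List.foldl_nil]
    rw [ihl (fun q hq => hne q (by simp [hq])) hpw.1 f s hf]
    exact key l po pn (by have := hne (po, pn) (by simp); simpa using this)
      (fun q hq => hne q (by simp [hq]))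
      (fun q hq => hpw.2.2 q hq (po, pn) (by simp)) f s hf

lemma toList_fold :
    ∀ (L : List (String × String)) (s : String),
      (L.foldl (fun h q => PySem.Str.replace h q.1 q.2) s).toList =
        (L.map (fun q => (q.1.toList, q.2.toList))).foldl
          (fun h q => PySem.Chars.replace h q.1 q.2) s.toList := by
  intro L
  induction L with
  | nil => intro s; simp
  | cons q L ih =>
    intro s
    simp only [List.foldl_cons, List.map_cons]
    rw [ih, PySem.Str.toList_replace]

lemma fold_replace_eq_fold_Repl :
    ∀ (L : List (List Char × List Char)) (s : List Char), (∀ q ∈ L, q.1 ≠ []) →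
      L.foldl (fun h q => PySem.Chars.replace h q.1 q.2) s =
        L.foldl (fun h q => Repl q.1 q.2 h.length h) s := by
  intro L
  induction L with
  | nil => intro s _; rfl
  | cons q L ih =>
    intro s hne
    simp only [List.foldl_cons]
    rw [replace_eq_Repl q.1 q.2 s (hne q (by simp))]
    exact ih _ (fun p hp => hne p (by simp [hp]))

lemma mapAB : pairsA.map (fun q => (q.1.toList, q.2.toList)) = pairsB := by decide

lemma pairsB_ne : ∀ q ∈ pairsB, q.1 ≠ [] := by decide

lemma pairsB_good : pairsB.Pairwise Good2 := by decide

-- ===== VERDICT (by name: the statement is the Claim_ definition above) =====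
theorem rootize_assets_spec : Claim_equal_rootize_assets := by
  intro html _
  unfold Spec_rootize_assets
  apply String.toList_inj.mp
  have hB : (rootize_assets_alt html).toList = scanGo pairsB html.toList.length html.toList := by
    unfold rootize_assets_alt
    rw [rootizeGo_eq_scanGo]
    simp
  have hA : (rootize_assets html).toList = scanGo pairsB html.toList.length html.toList := by
    unfold rootize_assets
    rw [toList_fold, mapAB, fold_replace_eq_fold_Repl pairsB html.toList pairsB_ne]
    exact fold_eq pairsB pairsB_ne pairsB_good html.toList.length html.toList le_rfl
  rw [hA, hB]
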